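-- pv_equiv track=rewrite | github.com/diego-aquino/competitive-programming | OBI/Exercices/newsDistribution.py | getAmountOfInformedUsers
-- ===== SOURCE A (Python) =====
-- def getAmountOfInformedUsers(n, m, groups):
--    total = 0
--    for j in range(n):
--       for i in range(m):
--          if groups[i][j] == 3:
--             total += 1
--             break
--
--    return total
-- ===== SOURCE B (Python) =====
-- def getAmountOfInformedUsers(n, m, groups):
--     if n <= 0:
--         return 0
--     informed = set()
--     for i in range(m):
--         for j in range(n):
--             if groups[i][j] == 3:
--                 informed.add(j)
--     return len(informed)
-- ===== Notes on version B (the rewrite author's own statement) =====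
-- stated objective: alternative
-- what changed: A scans columns-outer with a per-column early break and an integer counter; B scans the grid rows-outer in one row-major pass, collecting informed column indices into a set and returning its size.
-- outside the precondition, e.g. on getAmountOfInformedUsers(1, 2, [[3], []]): A returns 1, B raises IndexError
import Mathlib
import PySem

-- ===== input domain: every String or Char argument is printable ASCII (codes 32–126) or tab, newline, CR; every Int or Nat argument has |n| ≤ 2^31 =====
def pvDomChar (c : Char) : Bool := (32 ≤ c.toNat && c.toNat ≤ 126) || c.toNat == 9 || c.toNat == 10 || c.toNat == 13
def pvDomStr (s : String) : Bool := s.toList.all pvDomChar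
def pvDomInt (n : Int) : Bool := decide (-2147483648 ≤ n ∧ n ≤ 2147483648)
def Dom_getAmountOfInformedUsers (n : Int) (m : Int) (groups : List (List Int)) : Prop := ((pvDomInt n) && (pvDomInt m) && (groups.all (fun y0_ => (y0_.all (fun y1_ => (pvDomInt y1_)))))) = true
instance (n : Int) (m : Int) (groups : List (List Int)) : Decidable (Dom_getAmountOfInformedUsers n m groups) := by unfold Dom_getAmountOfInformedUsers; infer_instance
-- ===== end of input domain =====

-- B replaces A's columns-outer loop with an early break by a single row-major
-- pass that collects informed column indices into a set (alternative decomposition).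

-- ===== PORT A =====
-- columns-outer: for j in range(n): for i in range(m): if groups[i][j] == 3: total += 1; break
-- the break is carried as the Bool component of the inner fold's state
def getAmountOfInformedUsers (n : Int) (m : Int) (groups : List (List Int)) : Int :=
  (PySem.List.pyRange 0 n 1).foldl
    (fun total j =>
      ((PySem.List.pyRange 0 m 1).foldl
        (fun (st : Int × Bool) i =>
          if st.2 then st
          else if PySem.List.pyGetD (PySem.List.pyGetD groups i []) j 0 == 3 then (st.1 + 1, true)
          else st)
        (total, false)).1)
    0

-- ===== PORT B =====
-- if n <= 0: return 0  (no columns: nothing to count); then rows-outer: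
-- for i in range(m): for j in range(n): if groups[i][j] == 3: informed.add(j); return len(informed)
def getAmountOfInformedUsers_alt (n : Int) (m : Int) (groups : List (List Int)) : Int :=
  if n ≤ 0 then 0 else
  PySem.Set.len
    ((PySem.List.pyRange 0 m 1).foldl
      (fun (informed : PySem.Set Int) i =>
        (PySem.List.pyRange 0 n 1).foldl
          (fun informed j =>
            if PySem.List.pyGetD (PySem.List.pyGetD groups i []) j 0 == 3
            then PySem.Set.add informed j else informed)
          informed)
      PySem.Set.empty)

-- ===== PRECONDITION & SPEC =====
-- Pre_ excludes inputs on which Python raises IndexError (index beyond the rows or a row),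
-- and ragged grids on which only A's early break avoids the bad access while B raises.
def Pre_getAmountOfInformedUsers (n : Int) (m : Int) (groups : List (List Int)) : Prop :=
  n ≤ 0 ∨ m ≤ 0 ∨
    (m ≤ (groups.length : Int) ∧ ∀ row ∈ groups.take m.toNat, n ≤ (row.length : Int))
instance (n : Int) (m : Int) (groups : List (List Int)) : Decidable (Pre_getAmountOfInformedUsers n m groups) := by unfold Pre_getAmountOfInformedUsers; infer_instance

def pvWitness_getAmountOfInformedUsers : Int × Int × List (List Int) := (2, 2, [[3, 0], [0, 3]])

def Spec_getAmountOfInformedUsers (n : Int) (m : Int) (groups : List (List Int)) (out : Int) : Prop := out = getAmountOfInformedUsers_alt n m groups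
instance (n : Int) (m : Int) (groups : List (List Int)) (out : Int) : Decidable (Spec_getAmountOfInformedUsers n m groups out) := by unfold Spec_getAmountOfInformedUsers; infer_instance

-- ===== CLAIM (what is proved, stated in full; the proofs are below) =====
def Claim_equal_getAmountOfInformedUsers : Prop := ∀ (n : Int) (m : Int) (groups : List (List Int)), Dom_getAmountOfInformedUsers n m groups → Pre_getAmountOfInformedUsers n m groups → Spec_getAmountOfInformedUsers n m groups (getAmountOfInformedUsers n m groups)

-- ===== LEMMAS AND PROOFS =====

-- A's inner loop after the break fired: the state never changes again
theorem pvInnerA_true {α : Type} (p : α → Bool) (is : List α) (t : Int) :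
    is.foldl (fun (st : Int × Bool) i => if st.2 then st else if p i then (st.1 + 1, true) else st)
      (t, true) = (t, true) := by
  induction is with
  | nil => rfl
  | cons a l ih => simpa using ih

-- A's inner loop: adds 1 iff some element satisfies p
theorem pvInnerA {α : Type} (p : α → Bool) (is : List α) (t : Int) :
    is.foldl (fun (st : Int × Bool) i => if st.2 then st else if p i then (st.1 + 1, true) else st)
      (t, false) = (t + (if is.any p then 1 else 0), is.any p) := by
  induction is generalizing t with
  | nil => simp
  | cons a l ih =>
    by_cases h : p a
    · simp [h, pvInnerA_true]
    · simp [h, ih]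

-- A's double loop counts the j's whose column contains a hit
theorem pvOuterA {α β : Type} (q : β → α → Bool) (is : List β) (js : List α) (t : Int) :
    js.foldl
      (fun total j =>
        (is.foldl
          (fun (st : Int × Bool) i => if st.2 then st else if q i j then (st.1 + 1, true) else st)
          (total, false)).1)
      t
    = t + (js.countP (fun j => is.any (fun i => q i j)) : Int) := by
  simp only [pvInnerA]
  induction js generalizing t with
  | nil => simp
  | cons j js ih =>
    simp only [List.foldl_cons]
    rw [ih, List.countP_cons]
    split_ifs <;> push_cast <;> omega

-- B's inner loop: membership in the accumulated set
theorem pvInnerB {α : Type} [BEq α] [LawfulBEq α] (p : α → Bool) (js : List α)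
    (s : PySem.Set α) (x : α) :
    x ∈ js.foldl (fun s j => if p j then PySem.Set.add s j else s) s
      ↔ x ∈ s ∨ (x ∈ js ∧ p x = true) := by
  induction js generalizing s with
  | nil => simp
  | cons j js ih =>
    by_cases h : p j
    · simp only [List.foldl_cons, h, if_pos]
      rw [ih]
      simp only [PySem.Set.mem_add, List.mem_cons]
      constructor
      · rintro ((hs | rfl) | ⟨hj, hp⟩)
        · exact Or.inl hs
        · exact Or.inr ⟨Or.inl rfl, h⟩
        · exact Or.inr ⟨Or.inr hj, hp⟩
      · rintro (hs | ⟨(rfl | hj), hp⟩)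
        · exact Or.inl (Or.inl hs)
        · exact Or.inl (Or.inr rfl)
        · exact Or.inr ⟨hj, hp⟩
    · simp only [List.foldl_cons, h, if_neg, Bool.false_eq_true, not_false_iff]
      rw [ih]
      simp only [List.mem_cons]
      constructor
      · rintro (hs | ⟨hj, hp⟩)
        · exact Or.inl hs
        · exact Or.inr ⟨Or.inr hj, hp⟩
      · rintro (hs | ⟨(rfl | hj), hp⟩)
        · exact Or.inl hs
        · exact absurd hp (by simp [h])
        · exact Or.inr ⟨hj, hp⟩

theorem pvInnerB_nodup {α : Type} [BEq α] [LawfulBEq α] (p : α → Bool) (js : List α)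
    (s : PySem.Set α) (hs : s.Nodup) :
    (js.foldl (fun s j => if p j then PySem.Set.add s j else s) s).Nodup := by
  induction js generalizing s with
  | nil => exact hs
  | cons j js ih =>
    by_cases h : p j
    · simp only [List.foldl_cons, h, if_pos]
      exact ih _ (PySem.Set.nodup_add _ _ hs)
    · simpa [List.foldl_cons, h] using ih _ hs

-- B's double loop: membership in the final set
theorem pvOuterB {α β : Type} [BEq α] [LawfulBEq α] (q : β → α → Bool) (is : List β)
    (js : List α) (s : PySem.Set α) (x : α) :
    x ∈ is.foldl
        (fun s i => js.foldl (fun s j => if q i j then PySem.Set.add s j else s) s) s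
      ↔ x ∈ s ∨ (x ∈ js ∧ (is.any (fun i => q i x)) = true) := by
  induction is generalizing s with
  | nil => simp
  | cons i is ih =>
    simp only [List.foldl_cons, ih, pvInnerB, List.any_cons, Bool.or_eq_true]
    tauto

theorem pvOuterB_nodup {α β : Type} [BEq α] [LawfulBEq α] (q : β → α → Bool) (is : List β)
    (js : List α) (s : PySem.Set α) (hs : s.Nodup) :
    (is.foldl
      (fun s i => js.foldl (fun s j => if q i j then PySem.Set.add s j else s) s) s).Nodup := by
  induction is generalizing s with
  | nil => exact hs
  | cons i is ih => exact ih _ (pvInnerB_nodup _ _ _ hs)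

-- the whole equivalence, generically: A's counting double loop = size of B's set
theorem pvMain {α β : Type} [BEq α] [LawfulBEq α] (q : β → α → Bool) (is : List β)
    (js : List α) (hjs : js.Nodup) :
    js.foldl
      (fun total j =>
        (is.foldl
          (fun (st : Int × Bool) i => if st.2 then st else if q i j then (st.1 + 1, true) else st)
          (total, false)).1)
      0
    = PySem.Set.len
        (is.foldl
          (fun s i => js.foldl (fun s j => if q i j then PySem.Set.add s j else s) s)
          PySem.Set.empty) := by
  rw [pvOuterA]
  have hnodup : (is.foldl
      (fun s i => js.foldl (fun s j => if q i j then PySem.Set.add s j else s) s)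
      PySem.Set.empty).Nodup :=
    pvOuterB_nodup q is js PySem.Set.empty (by simp [PySem.Set.empty])
  have hperm :
      (is.foldl
        (fun s i => js.foldl (fun s j => if q i j then PySem.Set.add s j else s) s)
        PySem.Set.empty).Perm
      (js.filter (fun j => is.any (fun i => q i j))) := by
    rw [List.perm_ext_iff_of_nodup hnodup (hjs.filter _)]
    intro x
    rw [pvOuterB, List.mem_filter]
    simp [PySem.Set.empty]
  have hlen := hperm.length_eq
  rw [← List.countP_eq_length_filter] at hlen
  simp only [PySem.Set.len]
  rw [hlen]
  omega

-- ===== VERDICT (by name: the statement is the Claim_ definition above) =====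
theorem getAmountOfInformedUsers_spec : Claim_equal_getAmountOfInformedUsers := by
  intro n m groups _ _
  unfold Spec_getAmountOfInformedUsers getAmountOfInformedUsers getAmountOfInformedUsers_alt
  by_cases h : n ≤ 0
  · simp [h, PySem.List.pyRange_one_eq_nil h]
  · rw [if_neg h]
    exact pvMain _ _ _ (PySem.List.nodup_pyRange_one 0 n)
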